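-- pv_equiv track=rewrite | github.com/cczhong11/Leetcode-contest-code-downloader | Questiondir/544.output-contest-matches/544.output-contest-matches_97213264.py | findContestMatch
-- ===== SOURCE A (Python) =====
-- def findContestMatch(n):
--     """
--     :type n: int
--     :rtype: str
--     """
--     l = range(1, n+1)
--     while len(l) > 2:
--         l = [[l[i],l[-i-1]] for i in range(len(l)//2)]
--     ret = []
--     def f(l):
--         if type(l)==int:
--             ret.append(str(l))
--             return
--         ret.append('(')
--         f(l[0])
--         ret.append(',')
--         f(l[1])
--         ret.append(')')
--     f(l)
--     return ''.join(ret)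
-- ===== SOURCE B (Python) =====
-- def findContestMatch(n):
--     # Build the bracketed string bottom-up: pair the strings directly,
--     # no nested-list tree and no recursive serializer.
--     strings = [str(i) for i in range(1, n + 1)]
--     while len(strings) > 2:
--         strings = ['(' + strings[i] + ',' + strings[-i - 1] + ')'
--                    for i in range(len(strings) // 2)]
--     return '(' + strings[0] + ',' + strings[1] + ')'
-- ===== Notes on version B (the rewrite author's own statement) =====
-- stated objective: simpler
-- what changed: B assembles the parenthesized strings directly while pairing (bottom-up over a list of strings), dropping A's nested-list tree and the separate recursive serializer f.
import Mathlib
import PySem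

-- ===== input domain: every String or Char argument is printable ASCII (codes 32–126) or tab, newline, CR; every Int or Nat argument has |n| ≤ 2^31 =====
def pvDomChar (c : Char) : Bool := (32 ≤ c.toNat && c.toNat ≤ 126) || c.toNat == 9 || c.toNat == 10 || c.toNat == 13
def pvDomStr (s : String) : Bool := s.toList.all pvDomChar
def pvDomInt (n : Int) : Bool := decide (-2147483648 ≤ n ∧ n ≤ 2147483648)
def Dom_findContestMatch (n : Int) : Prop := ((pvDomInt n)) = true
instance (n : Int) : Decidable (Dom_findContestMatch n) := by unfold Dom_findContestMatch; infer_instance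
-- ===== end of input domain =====

-- B builds the bracketed strings directly while pairing, dropping A's nested-list tree
-- and its recursive serializer f (objective: simpler).

-- ===== PORT A =====
-- A builds a nested pair structure; Lean needs a tree type for it.
inductive PvTree where
  | leaf : Int → PvTree
  | node : PvTree → PvTree → PvTree
deriving DecidableEq, Repr

-- l = [[l[i], l[-i-1]] for i in range(len(l)//2)]
-- (every index i and -i-1 is in range for i < len//2, so Python's l[i] / l[-i-1]
--  are exactly these getD's; the default is never read)
def pvPairA (l : List PvTree) : List PvTree :=
  (List.range (l.length / 2)).map fun i =>
    PvTree.node (l.getD i (PvTree.leaf 0)) (l.getD (l.length - 1 - i) (PvTree.leaf 0))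

-- while len(l) > 2: l = [[l[i], l[-i-1]] ...]
def pvLoopA (l : List PvTree) : List PvTree :=
  if l.length > 2 then pvLoopA (pvPairA l) else l
termination_by l.length
decreasing_by simp [pvPairA]; omega

-- the recursive f: int → str(i); pair → '(' f(l[0]) ',' f(l[1]) ')'
def pvSer : PvTree → String
  | .leaf i => PySem.Int.toStr i
  | .node a b => "(" ++ pvSer a ++ "," ++ pvSer b ++ ")"

def findContestMatch (n : Int) : String :=
  let l := (PySem.List.pyRange 1 (n + 1) 1).map PvTree.leaf
  -- top-level f(l) on the final list: '(' f(l[0]) ',' f(l[1]) ')'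
  match pvLoopA l with
  | [a, b] => "(" ++ pvSer a ++ "," ++ pvSer b ++ ")"
  | _ => ""   -- Python raises IndexError here (n outside Pre_)

-- ===== PORT B =====
-- strings = ['(' + strings[i] + ',' + strings[-i-1] + ')' for i in range(len//2)]
-- (indices in range as above; the default "" is never read)
def pvPairB (l : List String) : List String :=
  (List.range (l.length / 2)).map fun i =>
    "(" ++ l.getD i "" ++ "," ++ l.getD (l.length - 1 - i) "" ++ ")"

def pvLoopB (l : List String) : List String :=
  if l.length > 2 then pvLoopB (pvPairB l) else l
termination_by l.length
decreasing_by simp [pvPairB]; omega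

def findContestMatch_alt (n : Int) : String :=
  let s := pvLoopB ((PySem.List.pyRange 1 (n + 1) 1).map PySem.Int.toStr)
  -- '(' + strings[0] + ',' + strings[1] + ')'  (strings[1] raises for n outside Pre_)
  "(" ++ s.getD 0 "" ++ "," ++ s.getD 1 "" ++ ")"

-- ===== PRECONDITION & SPEC =====
-- Pre_ excludes exactly the n on which Python A raises IndexError: repeated floor-halving
-- of n must reach exactly 2, i.e. n ∈ [2·2^k, 3·2^k) for some k (k < 32 suffices on Dom).
def Pre_findContestMatch (n : Int) : Prop :=
  ∃ k < 32, 2 * 2 ^ k ≤ n ∧ n < 3 * 2 ^ k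
instance (n : Int) : Decidable (Pre_findContestMatch n) := by
  unfold Pre_findContestMatch; infer_instance

def pvWitness_findContestMatch : Int := 4

def Spec_findContestMatch (n : Int) (out : String) : Prop := out = findContestMatch_alt n
instance (n : Int) (out : String) : Decidable (Spec_findContestMatch n out) := by
  unfold Spec_findContestMatch; infer_instance

-- ===== CLAIM (what is proved, stated in full; the proofs are below) =====
def Claim_equal_findContestMatch : Prop :=
  ∀ (n : Int), Dom_findContestMatch n → Pre_findContestMatch n →
    Spec_findContestMatch n (findContestMatch n)

-- ===== LEMMAS AND PROOFS =====

theorem pv_getD_map {α β : Type} (f : α → β) (l : List α) (i : Nat) (h : i < l.length)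
    (d : β) (d₀ : α) : (l.map f).getD i d = f (l.getD i d₀) := by
  simp [List.getD_eq_getElem?_getD, h]

theorem pv_pair_comm (l : List PvTree) :
    pvPairB (l.map pvSer) = (pvPairA l).map pvSer := by
  unfold pvPairA pvPairB
  rw [List.map_map, List.length_map]
  apply List.map_congr_left
  intro i hi
  have hi' : i < l.length / 2 := List.mem_range.mp hi
  have h1 : i < l.length := by omega
  have h2 : l.length - 1 - i < l.length := by omega
  simp only [Function.comp, pvSer,
    pv_getD_map pvSer l i h1 "" (PvTree.leaf 0),
    pv_getD_map pvSer l (l.length - 1 - i) h2 "" (PvTree.leaf 0)]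

theorem pv_loop_comm (l : List PvTree) :
    pvLoopB (l.map pvSer) = (pvLoopA l).map pvSer := by
  fun_induction pvLoopA l with
  | case1 l h ih =>
    rw [pvLoopB]
    simp only [List.length_map, if_pos h]
    rw [pv_pair_comm, ih]
  | case2 l h =>
    rw [pvLoopB]
    simp only [List.length_map, if_neg h]

theorem pv_loop_len : ∀ (k : Nat) (l : List PvTree),
    2 * 2 ^ k ≤ l.length → l.length < 3 * 2 ^ k → (pvLoopA l).length = 2 := by
  intro k
  induction k with
  | zero =>
    intro l h1 h2
    rw [pvLoopA]
    simp only [pow_zero] at h1 h2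
    rw [if_neg (by omega)]
    omega
  | succ k ih =>
    intro l h1 h2
    rw [pvLoopA, if_pos (by have := Nat.one_le_two_pow (n := k); omega)]
    apply ih
    · have : (pvPairA l).length = l.length / 2 := by simp [pvPairA]
      rw [this]; rw [pow_succ] at h1; omega
    · have : (pvPairA l).length = l.length / 2 := by simp [pvPairA]
      rw [this]; rw [pow_succ] at h2; omega

-- ===== VERDICT (by name: the statement is the Claim_ definition above) =====
theorem findContestMatch_spec : Claim_equal_findContestMatch := by
  intro n _hdom hpre
  obtain ⟨k, _hk, h1, h2⟩ := hpre
  unfold Spec_findContestMatch findContestMatch findContestMatch_alt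
  set base : List Int := PySem.List.pyRange 1 (n + 1) 1 with hbase
  have hlen : base.length = (n : Int).toNat := by
    rw [hbase, PySem.List.length_pyRange_one]; congr 1; omega
  have hlenT : ((base.map PvTree.leaf)).length = (n : Int).toNat := by
    simpa using hlen
  have hcomm : pvLoopB (base.map PySem.Int.toStr)
      = (pvLoopA (base.map PvTree.leaf)).map pvSer := by
    have : base.map PySem.Int.toStr = (base.map PvTree.leaf).map pvSer := by
      rw [List.map_map]; rfl
    rw [this, pv_loop_comm]
  have hpow : (1 : Nat) ≤ 2 ^ k := Nat.one_le_two_pow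
  have hn2 : 2 * 2 ^ k ≤ (n : Int).toNat ∧ (n : Int).toNat < 3 * 2 ^ k := by
    constructor
    · have : ((2 * 2 ^ k : Nat) : Int) ≤ n := by push_cast; exact_mod_cast h1
      omega
    · have : n < ((3 * 2 ^ k : Nat) : Int) := by push_cast; exact_mod_cast h2
      omega
  have h2len : (pvLoopA (base.map PvTree.leaf)).length = 2 :=
    pv_loop_len k _ (by omega) (by omega)
  match hfin : pvLoopA (base.map PvTree.leaf) with
  | [a, b] =>
    rw [hcomm]
    simp only [hfin]
    simp [List.getD]
  | [] => rw [hfin] at h2len; simp at h2len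
  | [_] => rw [hfin] at h2len; simp at h2len
  | _ :: _ :: _ :: _ => rw [hfin] at h2len; simp at h2len
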